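-- pv_equiv track=rewrite | github.com/Elvis-codeur/Analys | locals/m_parser.py | cut_with_math_symbols
-- ===== SOURCE A (Python) =====
-- def is_math_symbols(a):
--     if a == "+" or a == "-" or a == "/" or a=='*':
--         return True
--     else:
--         return False
--
-- def cut_with_math_symbols(text):
--     a = list()
--     for i in range(len(text)):
--         if is_math_symbols(text[i]):
--             a.append(i)
--
--     a.insert(0,0)
--     a.append(len(text))
--     args = list()
--     for i in range(1,len(a)):
--         if i == 1:
--             args.append(text[a[i-1]:a[i]])
--         else:
--             args.append(text[a[i-1]:a[i]])
--
--     return args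
-- ===== SOURCE B (Python) =====
-- def is_math_symbols(a):
--     if a == "+" or a == "-" or a == "/" or a=='*':
--         return True
--     else:
--         return False
--
-- def cut_with_math_symbols(text):
--     args = []
--     current = ""
--     for ch in text:
--         if is_math_symbols(ch):
--             args.append(current)
--             current = ch
--         else:
--             current += ch
--     args.append(current)
--     return args
-- ===== Notes on version B (the rewrite author's own statement) =====
-- stated objective: simpler
-- what changed: Replaced A's two-phase boundary-index-list + slicing loop by a single accumulation pass with a current-chunk buffer that is flushed at each math symbol and once at the end.
import Mathlib
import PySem

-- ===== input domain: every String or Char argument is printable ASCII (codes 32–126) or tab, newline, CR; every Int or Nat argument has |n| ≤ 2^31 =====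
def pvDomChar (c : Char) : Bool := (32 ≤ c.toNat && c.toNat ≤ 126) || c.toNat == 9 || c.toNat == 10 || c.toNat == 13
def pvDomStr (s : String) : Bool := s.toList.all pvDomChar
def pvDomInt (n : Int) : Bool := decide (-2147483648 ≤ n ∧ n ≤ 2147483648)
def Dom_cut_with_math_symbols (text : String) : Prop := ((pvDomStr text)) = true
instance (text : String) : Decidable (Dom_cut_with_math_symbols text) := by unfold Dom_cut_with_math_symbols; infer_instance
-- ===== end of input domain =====

-- B replaces A's boundary-index list + slicing loop by a single accumulation pass with a
-- current-chunk buffer flushed at each math symbol (objective: simpler; same return values).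

-- ===== PORT A =====
-- shared helper (Python is_math_symbols, applied to one-character strings = Char here)
def is_math_symbols (a : Char) : Bool :=
  if a == '+' || a == '-' || a == '/' || a == '*' then true else false

def cut_with_math_symbols (text : String) : List String :=
  let cs := text.toList
  let n : Int := cs.length
  let a : List Int :=
    (PySem.List.pyRange 0 n 1).foldl
      (fun acc i => if is_math_symbols (PySem.List.pyGetD cs i ' ') then acc ++ [i] else acc) []
  let a := PySem.List.insert a 0 0
  let a := a ++ [n]
  (PySem.List.pyRange 1 (a.length : Int) 1).foldl
    (fun args i =>
      if i == 1 then
        args ++ [String.ofList (PySem.List.slice cs (some (PySem.List.pyGetD a (i - 1) 0))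
          (some (PySem.List.pyGetD a i 0)))]
      else
        args ++ [String.ofList (PySem.List.slice cs (some (PySem.List.pyGetD a (i - 1) 0))
          (some (PySem.List.pyGetD a i 0)))]) []

-- ===== PORT B =====
-- B's loop: current buffer `cur`, flushed at each math symbol, final buffer appended
def cutGo (cur : List Char) : List Char → List (List Char)
  | [] => [cur]
  | c :: cs => if is_math_symbols c then cur :: cutGo [c] cs else cutGo (cur ++ [c]) cs

def cut_with_math_symbols_alt (text : String) : List String :=
  (cutGo [] text.toList).map String.ofList

-- ===== PRECONDITION & SPEC =====
def Spec_cut_with_math_symbols (text : String) (out : List String) : Prop := out = cut_with_math_symbols_alt text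
instance (text : String) (out : List String) : Decidable (Spec_cut_with_math_symbols text out) := by unfold Spec_cut_with_math_symbols; infer_instance

-- ===== CLAIM (what is proved, stated in full; the proofs are below) =====
def Claim_equal_cut_with_math_symbols : Prop := ∀ (text : String), Dom_cut_with_math_symbols text → Spec_cut_with_math_symbols text (cut_with_math_symbols text)

-- ===== LEMMAS AND PROOFS =====

-- positions (as Nats) of the math symbols in cs
def opsN (cs : List Char) : List Nat :=
  (List.range cs.length).filter (fun k => is_math_symbols (cs.getD k ' '))

-- slices of cs between consecutive boundaries
def consecSlices (cs : List Char) : List Nat → List (List Char)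
  | x :: y :: rest => (cs.drop x).take (y - x) :: consecSlices cs (y :: rest)
  | _ => []

-- A's chunk list, abstractly
def aSegs (cs : List Char) : List (List Char) :=
  consecSlices cs (0 :: (opsN cs ++ [cs.length]))

-- prepend cur to the first chunk
def headCons (cur : List Char) : List (List Char) → List (List Char)
  | [] => [cur]
  | h :: t => (cur ++ h) :: t

theorem headCons_append (a b : List Char) (l : List (List Char)) :
    headCons (a ++ b) l = headCons a (headCons b l) := by
  cases l <;> simp [headCons]

theorem headCons_cons (cur : List Char) (l : List (List Char)) :
    ∃ h t, headCons cur l = h :: t := by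
  cases l <;> simp [headCons]

theorem opsN_cons (c : Char) (cs : List Char) :
    opsN (c :: cs) = (if is_math_symbols c then [0] else []) ++ (opsN cs).map (· + 1) := by
  simp only [opsN, List.length_cons, List.range_succ_eq_map, List.filter_cons,
    List.filter_map, List.getD_cons_zero]
  by_cases h : is_math_symbols c = true <;>
    simp [h, Function.comp_def, Nat.succ_eq_add_one]

theorem rangePairs {α β : Type} (d : α) (f : α → α → β) (l : List α) :
    (List.range (l.length - 1)).map (fun k => f (l.getD k d) (l.getD (k + 1) d)) =
      (l.zip l.tail).map (fun p => f p.1 p.2) := by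
  induction l with
  | nil => simp
  | cons x t ih =>
    cases t with
    | nil => simp
    | cons y rest =>
      simp only [List.length_cons, Nat.add_sub_cancel, List.range_succ_eq_map,
        List.map_cons, List.map_map, List.getD_cons_zero, List.getD_cons_succ,
        List.tail_cons, List.zip_cons_cons]
      refine congrArg₂ _ rfl ?_
      simpa [Function.comp_def, Nat.succ_eq_add_one, List.getD_cons_succ] using ih

theorem pairsMap {α β : Type} (d : α) (f : α → α → β) (l : List α) :
    (PySem.List.pyRange 1 (l.length : Int) 1).map
        (fun i => f (PySem.List.pyGetD l (i - 1) d) (PySem.List.pyGetD l i d)) =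
      (l.zip l.tail).map (fun p => f p.1 p.2) := by
  rw [PySem.List.pyRange_one]
  have hlen : ((l.length : Int) - 1).toNat = l.length - 1 := by omega
  rw [hlen, List.map_map]
  rw [← rangePairs d f l]
  refine List.map_congr_left ?_
  intro k hk
  have h1 : (1 : Int) + (k : Int) - 1 = ((k : Nat) : Int) := by ring
  have h2 : (1 : Int) + (k : Int) = (((k + 1 : Nat)) : Int) := by push_cast; ring
  simp only [Function.comp_apply]
  rw [h1, h2]
  simp only [PySem.List.pyGetD_natCast]

theorem zipConsecInt (cs : List Char) (b : List Nat) :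
    (((b.map (fun k : Nat => (k : Int))).zip (b.map (fun k : Nat => (k : Int))).tail).map
        (fun p => String.ofList (PySem.List.slice cs (some p.1) (some p.2)))) =
      (consecSlices cs b).map String.ofList := by
  induction b with
  | nil => simp [consecSlices]
  | cons x t ih =>
    cases t with
    | nil => simp [consecSlices]
    | cons y rest =>
      simp only [List.map_cons, List.tail_cons, List.zip_cons_cons, consecSlices]
      refine congrArg₂ _ ?_ ?_
      · rw [PySem.List.slice_natCast]
      · simpa using ih

theorem shiftS (c : Char) (cs : List Char) (x : Nat) (ys : List Nat) :
    consecSlices (c :: cs) ((x + 1) :: ys.map (· + 1)) = consecSlices cs (x :: ys) := by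
  induction ys generalizing x with
  | nil => simp [consecSlices]
  | cons y rest ih =>
    simp only [List.map_cons, consecSlices]
    refine congrArg₂ _ ?_ (ih y)
    simp [Nat.add_sub_add_right]

theorem headT (c : Char) (cs : List Char) (y : Nat) (ys : List Nat) :
    consecSlices (c :: cs) (0 :: (y + 1) :: ys.map (· + 1)) =
      headCons [c] (consecSlices cs (0 :: y :: ys)) := by
  simp only [consecSlices, headCons, shiftS]
  simp

theorem aSegs_cons (c : Char) (cs : List Char) :
    aSegs (c :: cs) =
      if is_math_symbols c then [] :: headCons [c] (aSegs cs) else headCons [c] (aSegs cs) := by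
  have hm : ∃ y ys, opsN cs ++ [cs.length] = y :: ys := by
    cases opsN cs <;> simp
  obtain ⟨y, ys, hm⟩ := hm
  have hmap : (opsN cs).map (· + 1) ++ [cs.length + 1] = (y + 1) :: ys.map (· + 1) := by
    rw [show (opsN cs).map (· + 1) ++ [cs.length + 1] = (opsN cs ++ [cs.length]).map (· + 1) by
      simp, hm]
    simp
  unfold aSegs
  rw [opsN_cons]
  by_cases h : is_math_symbols c = true
  · have hlist : (0 : Nat) :: (([0] ++ (opsN cs).map (· + 1)) ++ [(c :: cs).length]) =
        0 :: 0 :: ((y + 1) :: ys.map (· + 1)) := by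
      simp only [List.length_cons, List.cons_append, List.nil_append]
      rw [hmap]
    rw [if_pos h, if_pos h, hlist]
    have h1 : consecSlices (c :: cs) (0 :: 0 :: (y + 1) :: ys.map (· + 1)) =
        ((c :: cs).drop 0).take (0 - 0) :: consecSlices (c :: cs) (0 :: (y + 1) :: ys.map (· + 1)) :=
      rfl
    rw [h1, headT]
    simp [hm]
  · have hlist : (0 : Nat) :: (([] ++ (opsN cs).map (· + 1)) ++ [(c :: cs).length]) =
        0 :: ((y + 1) :: ys.map (· + 1)) := by
      simp only [List.length_cons, List.nil_append]
      rw [hmap]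
    rw [if_neg h, if_neg h, hlist, headT]
    simp [hm]

theorem cutGo_eq (cs : List Char) : ∀ cur, cutGo cur cs = headCons cur (aSegs cs) := by
  induction cs with
  | nil => intro cur; simp [cutGo, aSegs, opsN, consecSlices, headCons]
  | cons c t ih =>
    intro cur
    rw [aSegs_cons]
    by_cases h : is_math_symbols c = true
    · simp only [cutGo, h, if_pos, ih]
      obtain ⟨hh, tt, ht⟩ := headCons_cons [c] (aSegs t)
      simp [headCons]
    · simp only [cutGo, h, if_neg, Bool.false_eq_true, not_false_iff, ih]
      rw [headCons_append]

theorem aSegs_ne_nil (cs : List Char) : ∃ h t, aSegs cs = h :: t := by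
  cases cs with
  | nil => exact ⟨[], [], by simp [aSegs, opsN, consecSlices]⟩
  | cons c t =>
    rw [aSegs_cons]
    by_cases h : is_math_symbols c = true
    · simp only [h, if_pos]; exact ⟨_, _, rfl⟩
    · simp only [if_neg h]; exact headCons_cons _ _

theorem cutGo_nil_eq (cs : List Char) : cutGo [] cs = aSegs cs := by
  rw [cutGo_eq]
  obtain ⟨h, t, ht⟩ := aSegs_ne_nil cs
  simp [ht, headCons]

theorem insert_zero_zero (a : List Int) : PySem.List.insert a 0 0 = 0 :: a := by
  simp [PySem.List.insert, PySem.List.sliceIndices]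

theorem opsCast (cs : List Char) :
    (PySem.List.pyRange 0 (cs.length : Int) 1).filter
        (fun i => is_math_symbols (PySem.List.pyGetD cs i ' ')) =
      (opsN cs).map (fun k : Nat => (k : Int)) := by
  rw [PySem.List.pyRange_one]
  simp only [zero_add]
  have hl : ((cs.length : Int) - 0).toNat = cs.length := by omega
  rw [hl, List.filter_map]
  unfold opsN
  have hq : ∀ k ∈ List.range cs.length,
      ((fun i => is_math_symbols (PySem.List.pyGetD cs i ' ')) ∘ fun k : Nat => ((k : Nat) : Int)) k
        = (fun k => is_math_symbols (cs.getD k ' ')) k := by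
    intro k _
    simp [PySem.List.pyGetD_natCast]
  rw [List.filter_congr hq]

theorem portA_eq (text : String) :
    cut_with_math_symbols text = (aSegs text.toList).map String.ofList := by
  unfold cut_with_math_symbols
  dsimp only
  rw [show (fun (acc : List Int) i =>
        if is_math_symbols (PySem.List.pyGetD text.toList i ' ') = true then acc ++ [i] else acc) =
      (fun (acc : List Int) i =>
        if is_math_symbols (PySem.List.pyGetD text.toList i ' ') = true then acc ++ [id i] else acc)
    from rfl]
  rw [PySem.List.foldl_append_if, opsCast, List.map_id, insert_zero_zero, List.nil_append]
  rw [show (((0 : Int) :: (opsN text.toList).map (fun k : Nat => (k : Int))) ++ [(text.toList.length : Int)]) =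
      (0 :: (opsN text.toList ++ [text.toList.length])).map (fun k : Nat => (k : Int)) by simp]
  set l := (0 :: (opsN text.toList ++ [text.toList.length])).map (fun k : Nat => (k : Int)) with hl
  rw [show (fun (args : List String) (i : Int) =>
        if i == 1 then
          args ++ [String.ofList (PySem.List.slice text.toList
            (some (PySem.List.pyGetD l (i - 1) 0)) (some (PySem.List.pyGetD l i 0)))]
        else
          args ++ [String.ofList (PySem.List.slice text.toList
            (some (PySem.List.pyGetD l (i - 1) 0)) (some (PySem.List.pyGetD l i 0)))]) =
      (fun (args : List String) (i : Int) =>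
        args ++ [String.ofList (PySem.List.slice text.toList
          (some (PySem.List.pyGetD l (i - 1) 0)) (some (PySem.List.pyGetD l i 0)))]) by
    funext args i; exact ite_self _]
  rw [PySem.List.foldl_append_singleton_eq_map, List.nil_append]
  refine Eq.trans ?_ (zipConsecInt text.toList (0 :: (opsN text.toList ++ [text.toList.length])))
  exact pairsMap (0 : Int)
    (fun x y => String.ofList (PySem.List.slice text.toList (some x) (some y))) l

-- ===== VERDICT (by name: the statement is the Claim_ definition above) =====
theorem cut_with_math_symbols_spec : Claim_equal_cut_with_math_symbols := by
  intro text _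
  unfold Spec_cut_with_math_symbols cut_with_math_symbols_alt
  rw [portA_eq, cutGo_nil_eq]
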